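-- pv_equiv track=rewrite | github.com/vassia38/myIDS | utils.py | make_flags_byte_from_string
-- ===== SOURCE A (Python) =====
-- def make_flags_byte_from_string(s: str) -> int:
--     n = 0
--     fl = 0
--     for i in range(len(s), 0, -1):
--         if s[i-1] != '.':
--             fl += pow(2,n)
--         n += 1
--     return fl
-- ===== SOURCE B (Python) =====
-- def make_flags_byte_from_string(s: str) -> int:
--     binary = ''.join('0' if c == '.' else '1' for c in s)
--     return int(binary or '0', 2)
-- ===== Notes on version B (the rewrite author's own statement) =====
-- stated objective: idiomatic
-- what changed: B maps the string to a '0'/'1' string and delegates the bit accumulation to int(binary, 2), instead of A's backwards index loop that maintains an exponent counter and sums pow(2, n).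
import Mathlib
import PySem

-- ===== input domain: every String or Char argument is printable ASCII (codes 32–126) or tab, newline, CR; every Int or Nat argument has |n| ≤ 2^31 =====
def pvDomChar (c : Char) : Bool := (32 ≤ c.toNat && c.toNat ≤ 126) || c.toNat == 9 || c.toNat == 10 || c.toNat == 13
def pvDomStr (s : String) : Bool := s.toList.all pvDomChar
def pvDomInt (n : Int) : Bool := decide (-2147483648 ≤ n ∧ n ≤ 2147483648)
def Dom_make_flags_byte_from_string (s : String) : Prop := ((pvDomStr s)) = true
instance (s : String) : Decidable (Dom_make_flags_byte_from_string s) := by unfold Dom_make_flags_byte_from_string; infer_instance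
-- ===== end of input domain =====

-- B replaces A's backwards index loop (exponent counter + pow(2, n)) by mapping the string to
-- a '0'/'1' string and handing the bit accumulation to the base-2 integer parser (idiomatic).


-- ===== PORT A =====
-- for i in range(len(s), 0, -1): if s[i-1] != '.': fl += pow(2, n); n += 1
-- state (n, fl); s[i-1] is always in range here, so the pyGetD default '.' is never used;
-- n stays ≥ 0, so pow(2, n) is 2 ^ n.toNat.
def make_flags_byte_from_string (s : String) : Int :=
  ((PySem.List.pyRange (PySem.Str.len s) 0 (-1)).foldl
    (fun (st : Int × Int) i =>
      (st.1 + 1,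
       if PySem.List.pyGetD s.toList (i - 1) '.' ≠ '.' then st.2 + 2 ^ st.1.toNat else st.2))
    (0, 0)).2

-- ===== PORT B =====
-- hand port of int(binary, 2) (big-endian base-2 Horner scan); exact here because the argument
-- B passes is always a nonempty string of plain '0'/'1' digits (no sign/space/underscore/prefix).
def pvParseBin2 (cs : List Char) : Int :=
  cs.foldl (fun acc c => acc * 2 + (if c = '1' then 1 else 0)) 0

-- binary = ''.join('0' if c == '.' else '1' for c in s); return int(binary or '0', 2)
def make_flags_byte_from_string_alt (s : String) : Int :=
  let binary := s.toList.map (fun c => if c = '.' then '0' else '1')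
  pvParseBin2 (if binary = [] then ['0'] else binary)

-- ===== PRECONDITION & SPEC =====
def Spec_make_flags_byte_from_string (s : String) (out : Int) : Prop := out = make_flags_byte_from_string_alt s
instance (s : String) (out : Int) : Decidable (Spec_make_flags_byte_from_string s out) := by unfold Spec_make_flags_byte_from_string; infer_instance

-- ===== CLAIM (what is proved, stated in full; the proofs are below) =====
def Claim_equal_make_flags_byte_from_string : Prop := ∀ (s : String), Dom_make_flags_byte_from_string s → Spec_make_flags_byte_from_string s (make_flags_byte_from_string s)

-- ===== LEMMAS AND PROOFS =====

-- big-endian value of the raw character list, A-side flavour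
def pvBigVal (l : List Char) : Int :=
  l.foldl (fun acc c => acc * 2 + (if c = '.' then 0 else 1)) 0

theorem pvBigVal_append_singleton (t : List Char) (c : Char) :
    pvBigVal (t ++ [c]) = pvBigVal t * 2 + (if c = '.' then 0 else 1) := by
  simp [pvBigVal, List.foldl_append]

-- B's parse of the mapped list is pvBigVal
theorem pvParseBin2_map (l : List Char) :
    pvParseBin2 (l.map (fun c => if c = '.' then '0' else '1')) = pvBigVal l := by
  unfold pvParseBin2 pvBigVal
  rw [List.foldl_map]
  apply List.foldl_ext
  intro a c _
  by_cases h : c = '.' <;> simp [h]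

-- invariant of A's backwards loop: folding over range(|t|, 0, -1) while indexing into t ++ rest
-- adds 2 ^ n0 * pvBigVal t to the accumulator
theorem pvAfold (t : List Char) :
    ∀ (rest : List Char) (n0 fl0 : Int), 0 ≤ n0 →
    ((PySem.List.pyRange (t.length : Int) 0 (-1)).foldl
      (fun (st : Int × Int) i =>
        (st.1 + 1,
         if PySem.List.pyGetD (t ++ rest) (i - 1) '.' ≠ '.' then st.2 + 2 ^ st.1.toNat else st.2))
      (n0, fl0)).2 = fl0 + 2 ^ n0.toNat * pvBigVal t := by
  induction t using List.reverseRecOn with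
  | nil =>
      intro rest n0 fl0 h
      rw [PySem.List.pyRange_neg_one_eq_nil (by simp)]
      simp [pvBigVal]
  | append_singleton t c ih =>
      intro rest n0 fl0 h
      have hlen : ((t ++ [c]).length : Int) = (t.length : Int) + 1 := by
        simp [List.length_append]
      rw [hlen, PySem.List.pyRange_neg_one_cons (by positivity)]
      have hget : PySem.List.pyGetD ((t ++ [c]) ++ rest) ((t.length : Int) + 1 - 1) '.' = c := by
        have : (t.length : Int) + 1 - 1 = ((t.length : Nat) : Int) := by ring
        rw [this, PySem.List.pyGetD_natCast]
        simp [List.append_assoc, List.getD]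
      rw [List.foldl_cons]
      simp only [hget]
      rw [add_sub_cancel_right, show (t ++ [c]) ++ rest = t ++ ([c] ++ rest) by simp,
        ih ([c] ++ rest) (n0 + 1) _ (by omega)]
      have hpow : (2 : Int) ^ (n0 + 1).toNat = 2 ^ n0.toNat * 2 := by
        rw [show (n0 + 1).toNat = n0.toNat + 1 by omega, pow_succ]
      rw [pvBigVal_append_singleton]
      by_cases hc : c = '.' <;> simp [hc, hpow] <;> ring

-- ===== VERDICT (by name: the statement is the Claim_ definition above) =====
theorem make_flags_byte_from_string_spec : Claim_equal_make_flags_byte_from_string := by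
  intro s _
  unfold Spec_make_flags_byte_from_string make_flags_byte_from_string make_flags_byte_from_string_alt
  rw [PySem.Str.len_eq]
  rcases hl : s.toList with _ | ⟨c, cs⟩
  · simp [PySem.List.pyRange_neg_one_eq_nil, pvParseBin2]
  · have hne : (c :: cs).map (fun c => if c = '.' then '0' else '1') ≠ [] := by simp
    have hfold := pvAfold (c :: cs) [] 0 0 le_rfl
    simp only [List.append_nil] at hfold
    rw [hfold]
    simp only [if_neg hne, pvParseBin2_map]
    simp
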